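-- pv_equiv track=rewrite | github.com/coreycottrell/witness-react-portal | portal_server.py | _despace
-- ===== SOURCE A (Python) =====
-- def _despace(text):
--     """Collapse spaced-out text like 'H  e  l  l  o' back to 'Hello'.
--     Some older JSONL sessions store text with spaces between every character."""
--     if not text or len(text) < 6:
--         return text
--     # Check if text follows the pattern: char, spaces, char, spaces...
--     # Sample first 40 chars to detect the pattern
--     sample = text[:40]
--     # Pattern: single non-space char followed by 1-2 spaces, repeating
--     spaced_chars = 0
--     i = 0
--     while i < len(sample):
--         if i + 1 < len(sample) and sample[i] != " " and sample[i + 1] == " ":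
--             spaced_chars += 1
--             i += 1
--             while i < len(sample) and sample[i] == " ":
--                 i += 1
--         else:
--             i += 1
--     # If >60% of non-space chars are followed by spaces, it's spaced text
--     non_space = sum(1 for c in sample if c != " ")
--     if non_space > 0 and spaced_chars / non_space > 0.6:
--         # Collapse: take every non-space char, but preserve intentional word gaps
--         result = []
--         i = 0
--         while i < len(text):
--             if text[i] != " ":
--                 result.append(text[i])
--                 i += 1
--                 # Skip the inter-character spaces (1-2 spaces)
--                 spaces = 0
--                 while i < len(text) and text[i] == " ":
--                     spaces += 1
--                     i += 1
--                 # 3+ spaces likely means intentional word boundary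
--                 if spaces >= 3:
--                     result.append(" ")
--             else:
--                 i += 1
--         return "".join(result)
--     return text
-- ===== SOURCE B (Python) =====
-- def _despace(text):
--     """Collapse spaced-out text like 'H  e  l  l  o' back to 'Hello'."""
--     if not text or len(text) < 6:
--         return text
--     sample = text[:40]
--     non_space = len(sample) - sample.count(' ')
--     # non-overlapping "non-space followed by space" pairs; adjacent matches
--     # cannot overlap, so a pairwise scan counts exactly the same occurrences
--     spaced = sum(1 for a, b in zip(sample, sample[1:]) if a != ' ' and b == ' ')
--     # integer form of spaced / non_space > 0.6 (exact for these magnitudes)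
--     if non_space == 0 or 5 * spaced <= 3 * non_space:
--         return text
--     # run-length encode, then map each space run to '' (len 1-2) or ' ' (len 3+)
--     groups = []
--     for c in text:
--         if groups and groups[-1][0] == c:
--             groups[-1] = (c, groups[-1][1] + 1)
--         else:
--             groups.append((c, 1))
--     out = ''.join((' ' if n >= 3 else '') if c == ' ' else c * n
--                   for c, n in groups)
--     return out.lstrip(' ')
-- ===== Notes on version B (the rewrite author's own statement) =====
-- stated objective: alternative
-- what changed: Detection becomes a single pairwise zip-scan with an exact integer ratio test instead of A's index-walking skip loop, and the collapse becomes run-length encoding followed by a per-run mapping (space runs of 1-2 chars drop, 3+ become one space) plus lstrip, instead of A's nested index/while loops.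
import Mathlib
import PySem

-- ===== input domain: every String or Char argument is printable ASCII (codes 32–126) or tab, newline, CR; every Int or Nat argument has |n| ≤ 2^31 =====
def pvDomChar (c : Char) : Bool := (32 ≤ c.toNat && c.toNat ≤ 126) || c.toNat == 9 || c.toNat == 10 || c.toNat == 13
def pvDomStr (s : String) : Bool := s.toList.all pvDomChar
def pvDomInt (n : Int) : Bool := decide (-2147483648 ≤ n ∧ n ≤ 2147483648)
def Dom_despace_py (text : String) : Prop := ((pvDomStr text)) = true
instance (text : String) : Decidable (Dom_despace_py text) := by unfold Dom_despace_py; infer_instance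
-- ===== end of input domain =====

-- B re-implements A's collapse as run-length encoding + per-run mapping, and its
-- detection as a pairwise scan with an exact integer form of the ratio test (objective: alternative).

-- ===== PORT A =====
-- inner `while text[i] == ' ': i += 1` loops of A
def despaceSkipSp (l : List Char) : List Char := l.dropWhile (· = ' ')

-- A's first while loop: count non-space chars followed by a space, skipping the space run
def despaceCountA : List Char → Nat
  | [] => 0
  | [_] => 0
  | c :: d :: rest =>
    if c ≠ ' ' ∧ d = ' ' then 1 + despaceCountA (despaceSkipSp rest)
    else despaceCountA (d :: rest)
termination_by l => l.length
decreasing_by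
  · have := List.length_dropWhile_le (fun c => c = ' ') rest
    simp [despaceSkipSp] at *; omega
  · simp

-- A's second while loop: append each non-space char, skip its space run, keep ' ' for runs of 3+
def despaceCollapseA : List Char → List Char
  | [] => []
  | c :: rest =>
    if c ≠ ' ' then
      c :: ((if (rest.takeWhile (· = ' ')).length ≥ 3 then [' '] else []) ++
            despaceCollapseA (despaceSkipSp rest))
    else despaceCollapseA rest
termination_by l => l.length
decreasing_by
  · have := List.length_dropWhile_le (fun c => c = ' ') rest
    simp [despaceSkipSp] at *; omega
  · simp

def despace_py (text : String) : String :=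
  let tl := text.toList
  if tl.length = 0 ∨ tl.length < 6 then text   -- `if not text or len(text) < 6`
  else
    let sample := tl.take 40                   -- text[:40]
    let spaced := despaceCountA sample
    let nonSpace := (sample.filter (fun c => c ≠ ' ')).length
    -- exact integer form of `spaced / non_space > 0.6`: with non_space ≤ 40 the float
    -- comparison and 5*spaced > 3*non_space decide identically (gap to 3/5 is ≥ 1/200)
    if nonSpace > 0 ∧ 5 * spaced > 3 * nonSpace then
      String.ofList (despaceCollapseA tl)      -- "".join(result)
    else text

-- ===== PORT B =====
-- Source B's group loop (append at end / update last) rendered as a fold on the reversed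
-- accumulator (head = current last run), reversed at the end
def despaceRleStep (gs : List (Char × Nat)) (c : Char) : List (Char × Nat) :=
  match gs with
  | (c', n) :: t => if c' = c then (c', n + 1) :: t else (c, 1) :: (c', n) :: t
  | [] => [(c, 1)]

-- Source B's per-group expression inside the join
def despaceEmit (g : Char × Nat) : List Char :=
  if g.1 = ' ' then (if g.2 ≥ 3 then [' '] else []) else List.replicate g.2 g.1

def despace_py_alt (text : String) : String :=
  let tl := text.toList
  if tl.length = 0 ∨ tl.length < 6 then text
  else
    let sample := tl.take 40
    let nonSpace := sample.length - sample.count ' '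
    let spaced := ((sample.zip (sample.drop 1)).filter (fun p => p.1 ≠ ' ' ∧ p.2 = ' ')).length
    if nonSpace = 0 ∨ 5 * spaced ≤ 3 * nonSpace then text
    else
      let groups := (tl.foldl despaceRleStep []).reverse
      String.ofList ((groups.flatMap despaceEmit).dropWhile (· = ' '))  -- ''.join(…).lstrip(' ')

-- ===== PRECONDITION & SPEC =====
def Spec_despace_py (text : String) (out : String) : Prop := out = despace_py_alt text
instance (text : String) (out : String) : Decidable (Spec_despace_py text out) := by unfold Spec_despace_py; infer_instance

-- ===== CLAIM (what is proved, stated in full; the proofs are below) =====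
def Claim_equal_despace_py : Prop := ∀ (text : String), Dom_despace_py text → Spec_despace_py text (despace_py text)

-- ===== LEMMAS AND PROOFS =====

-- B's pairwise detection count, as it appears inline in despace_py_alt
def despaceCntB (l : List Char) : Nat :=
  ((l.zip (l.drop 1)).filter (fun p => p.1 ≠ ' ' ∧ p.2 = ' ')).length

lemma despaceCntB_space_cons (xs : List Char) : despaceCntB (' ' :: xs) = despaceCntB xs := by
  cases xs with
  | nil => rfl
  | cons y ys => simp [despaceCntB, List.zip_cons_cons]

lemma despaceCntB_dropWhile (xs : List Char) :
    despaceCntB (xs.dropWhile (· = ' ')) = despaceCntB xs := by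
  induction xs with
  | nil => rfl
  | cons y ys ih =>
    by_cases h : y = ' '
    · subst h; rw [List.dropWhile_cons_of_pos (by simp), ih, despaceCntB_space_cons]
    · rw [List.dropWhile_cons_of_neg (by simp [h])]

lemma despaceCountA_eq_cntB (l : List Char) : despaceCountA l = despaceCntB l := by
  fun_induction despaceCountA l with
  | case1 => rfl
  | case2 _ => rfl
  | case3 c d rest h ih =>
    obtain ⟨hc, hd⟩ := h
    subst hd
    rw [ih, despaceSkipSp, despaceCntB_dropWhile]
    show _ = despaceCntB (c :: ' ' :: rest)
    rw [despaceCntB, despaceCntB]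
    cases rest with
    | nil => simp [hc]
    | cons e es => simp [List.zip_cons_cons, hc]; omega
  | case4 c d rest h ih =>
    rw [ih]
    show _ = despaceCntB (c :: d :: rest)
    rw [despaceCntB, despaceCntB]
    simp only [List.zip_cons_cons, List.drop_succ_cons, List.drop_zero, List.filter_cons]
    have : ¬(c ≠ ' ' ∧ d = ' ') := h
    simp [this]

lemma despace_filter_len (l : List Char) :
    (l.filter (fun c => c ≠ ' ')).length = l.length - l.count ' ' := by
  rw [← List.countP_eq_length_filter, List.count]
  have h := List.length_eq_countP_add_countP (p := fun c : Char => c == ' ') (l := l)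
  have h2 : List.countP (fun a : Char => decide ¬(a == ' ') = true) l
      = List.countP (fun c : Char => decide (c ≠ ' ')) l :=
    List.countP_congr (fun a _ => by simp)
  rw [h2] at h
  omega

-- recursive run-length encoding, the spine of the correctness proof for B's fold
def despaceRleR : List Char → List (Char × Nat)
  | [] => []
  | c :: rest =>
    (c, (rest.takeWhile (· = c)).length + 1) :: despaceRleR (rest.dropWhile (· = c))
termination_by l => l.length
decreasing_by
  have := List.length_dropWhile_le (fun x => x = c) rest
  simp at *; omega

lemma despace_foldl_rleStep_cons (l : List Char) (g : Char × Nat) (t : List (Char × Nat)) :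
    l.foldl despaceRleStep (g :: t) = l.foldl despaceRleStep [g] ++ t := by
  induction l generalizing g t with
  | nil => rfl
  | cons c l' ih =>
    obtain ⟨c', n⟩ := g
    simp only [List.foldl_cons]
    by_cases h : c' = c
    · simp only [despaceRleStep, if_pos h]
      exact ih _ _
    · simp only [despaceRleStep, if_neg h]
      rw [ih (c, 1) ((c', n) :: t), ih (c, 1) [(c', n)], List.append_assoc]
      rfl

lemma despace_foldl_rleStep_single (l : List Char) :
    ∀ (c : Char) (n : Nat),
    (l.foldl despaceRleStep [(c, n)]).reverse
      = (c, n + (l.takeWhile (· = c)).length) :: despaceRleR (l.dropWhile (· = c)) := by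
  induction l with
  | nil => intro c n; simp [despaceRleR]
  | cons d l' ih =>
    intro c n
    simp only [List.foldl_cons]
    by_cases h : c = d
    · subst h
      simp only [despaceRleStep, if_true]
      rw [ih c (n + 1)]
      rw [List.takeWhile_cons_of_pos (by simp), List.dropWhile_cons_of_pos (by simp)]
      simp; omega
    · simp only [despaceRleStep, if_neg h]
      rw [despace_foldl_rleStep_cons, List.reverse_append, ih d 1]
      rw [List.takeWhile_cons_of_neg (by simp [Ne.symm h]),
          List.dropWhile_cons_of_neg (by simp [Ne.symm h])]
      simp [despaceRleR]
      omega

lemma despaceRleB_eq_rleR (l : List Char) :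
    (l.foldl despaceRleStep []).reverse = despaceRleR l := by
  cases l with
  | nil => simp [despaceRleR]
  | cons c l' =>
    simp only [List.foldl_cons]
    show ((l'.foldl despaceRleStep [(c, 1)])).reverse = _
    rw [despace_foldl_rleStep_single l' c 1, despaceRleR]
    simp; omega

lemma despaceCollapseA_space_cons (rest : List Char) :
    despaceCollapseA (' ' :: rest) = despaceCollapseA rest := by
  rw [despaceCollapseA]; simp

lemma despaceCollapseA_dropWhile (l : List Char) :
    despaceCollapseA (l.dropWhile (· = ' ')) = despaceCollapseA l := by
  induction l with
  | nil => rfl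
  | cons c rest ih =>
    by_cases h : c = ' '
    · subst h
      rw [List.dropWhile_cons_of_pos (by simp), ih, despaceCollapseA_space_cons]
    · rw [List.dropWhile_cons_of_neg (by simp [h])]

lemma despaceCollapseA_replicate (k : Nat) (c : Char) (rest : List Char) (h : c ≠ ' ') :
    despaceCollapseA (List.replicate k c ++ c :: rest)
      = List.replicate k c ++ despaceCollapseA (c :: rest) := by
  induction k with
  | zero => simp
  | succ k ih =>
    have hhead : ∃ t, List.replicate k c ++ c :: rest = c :: t := by
      cases k with
      | zero => exact ⟨rest, rfl⟩
      | succ k => exact ⟨List.replicate k c ++ c :: rest, by simp [List.replicate_succ]⟩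
    obtain ⟨t, ht⟩ := hhead
    rw [List.replicate_succ, List.cons_append, despaceCollapseA, if_pos (by simp [h])]
    rw [ht, List.takeWhile_cons_of_neg (by simp [h]), despaceSkipSp,
        List.dropWhile_cons_of_neg (by simp [h]), ← ht, ih]
    simp

lemma despace_tw_dw_nil (p : Char → Bool) (xs : List Char) :
    (xs.dropWhile p).takeWhile p = [] := by
  cases hh : xs.dropWhile p with
  | nil => rfl
  | cons y ys =>
    have : ¬ p y = true := by
      have := List.head_dropWhile_not p (l := xs) (by simp [hh])
      simpa [hh] using this
    rw [List.takeWhile_cons_of_neg this]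

lemma despace_flatMap_rleR (l : List Char) :
    (despaceRleR l).flatMap despaceEmit
      = (if (l.takeWhile (· = ' ')).length ≥ 3 then [' '] else []) ++ despaceCollapseA l := by
  fun_induction despaceRleR l with
  | case1 => simp [despaceCollapseA]
  | case2 c rest ih =>
    by_cases hc : c = ' '
    · subst hc
      rw [List.flatMap_cons, ih, despace_tw_dw_nil, despaceCollapseA_space_cons,
          ← despaceCollapseA_dropWhile rest]
      simp [despaceEmit, List.takeWhile_cons_of_pos]
    · have hrep : rest.takeWhile (· = c) = List.replicate ((rest.takeWhile (· = c)).length) c := by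
        apply List.eq_replicate_length.2
        intro b hb
        have := List.mem_takeWhile_imp hb
        simpa using this
      have hsplit : c :: rest
          = List.replicate ((rest.takeWhile (· = c)).length) c ++ c :: rest.dropWhile (· = c) := by
        conv_lhs => rw [← List.takeWhile_append_dropWhile (p := (· = c)) (l := rest)]
        rw [hrep]
        rw [← List.cons_append, ← List.replicate_succ, List.replicate_succ']
        simp
      rw [List.flatMap_cons, ih]
      rw [List.takeWhile_cons_of_neg (by simp [hc])]
      conv_rhs => rw [hsplit]
      rw [despaceCollapseA_replicate _ _ _ hc]
      rw [despaceCollapseA, if_pos (show c ≠ ' ' from hc), despaceSkipSp, despaceCollapseA_dropWhile]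
      have hemit : despaceEmit (c, (rest.takeWhile (· = c)).length + 1)
          = List.replicate ((rest.takeWhile (· = c)).length + 1) c := by
        simp [despaceEmit, hc]
      rw [hemit, List.replicate_succ']
      simp

lemma despace_dropWhile_collapseA (l : List Char) :
    (despaceCollapseA l).dropWhile (· = ' ') = despaceCollapseA l := by
  fun_induction despaceCollapseA l with
  | case1 => rfl
  | case2 c rest h ih => rw [List.dropWhile_cons_of_neg (by simpa using h)]
  | case3 c rest h ih => exact ih

lemma despace_collapse_main (l : List Char) :
    ((l.foldl despaceRleStep []).reverse.flatMap despaceEmit).dropWhile (· = ' ')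
      = despaceCollapseA l := by
  rw [despaceRleB_eq_rleR, despace_flatMap_rleR]
  split
  · rw [List.cons_append, List.nil_append, List.dropWhile_cons_of_pos (by simp),
        despace_dropWhile_collapseA]
  · rw [List.nil_append, despace_dropWhile_collapseA]

-- ===== VERDICT (by name: the statement is the Claim_ definition above) =====
theorem despace_py_spec : Claim_equal_despace_py := by
  intro text _
  show despace_py text = despace_py_alt text
  unfold despace_py despace_py_alt
  by_cases h1 : text.toList.length = 0 ∨ text.toList.length < 6
  · simp only [h1, if_true]
  · simp only [h1, if_false]
    have hcount : despaceCountA (text.toList.take 40)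
        = ((( text.toList.take 40).zip ((text.toList.take 40).drop 1)).filter
            (fun p => p.1 ≠ ' ' ∧ p.2 = ' ')).length :=
      despaceCountA_eq_cntB _
    have hns := despace_filter_len (text.toList.take 40)
    have hcle : (text.toList.take 40).count ' ' ≤ (text.toList.take 40).length :=
      List.count_le_length
    by_cases h2 : ((text.toList.take 40).filter (fun c => c ≠ ' ')).length > 0 ∧
        5 * despaceCountA (text.toList.take 40)
          > 3 * ((text.toList.take 40).filter (fun c => c ≠ ' ')).length
    · rw [if_pos h2, if_neg (by omega)]
      exact congrArg String.ofList (despace_collapse_main text.toList).symm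
    · rw [if_neg h2, if_pos (by omega)]
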